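-- pv_equiv track=rewrite | github.com/Necryotiks/WSU-CPTS | 355/HW3.py | lookupVal
-- ===== SOURCE A (Python) =====
-- def lookupVal(L,k):
--     for item in reversed(L):
--         try:
--             return(item[k]) #hacky as all shit
--             return
--         except:
--             pass
--     return(None)
-- ===== SOURCE B (Python) =====
-- def lookupVal(L, k):
--     result = None
--     for item in L:
--         try:
--             result = item[k]
--         except:
--             pass
--     return result
-- ===== Notes on version B (the rewrite author's own statement) =====
-- stated objective: alternative
-- what changed: B scans L forward once, overwriting the result on each successful lookup, instead of A's early-return scan over reversed(L); the last success in forward order equals A's first success from the end.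
import Mathlib
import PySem

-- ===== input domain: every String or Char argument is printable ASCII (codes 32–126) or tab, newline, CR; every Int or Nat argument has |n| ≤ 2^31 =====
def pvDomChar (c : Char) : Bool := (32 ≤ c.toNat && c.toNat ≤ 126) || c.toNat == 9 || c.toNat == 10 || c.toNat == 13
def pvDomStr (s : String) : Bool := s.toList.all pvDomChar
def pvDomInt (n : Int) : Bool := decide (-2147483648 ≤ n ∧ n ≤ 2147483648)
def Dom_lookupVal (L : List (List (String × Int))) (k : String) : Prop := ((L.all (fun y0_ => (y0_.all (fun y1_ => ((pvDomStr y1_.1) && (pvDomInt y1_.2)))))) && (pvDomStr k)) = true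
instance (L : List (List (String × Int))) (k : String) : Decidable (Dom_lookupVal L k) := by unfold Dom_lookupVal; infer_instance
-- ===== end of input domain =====

-- B scans forward overwriting the result instead of A's early-return scan over reversed(L); same cost, different decomposition.
-- ===== PORT A =====
-- item[k] on a dict (assoc list): first pair with key k, none = KeyError (caught by A's bare except)
def pvGetKey? (item : List (String × Int)) (k : String) : Option Int :=
  (item.find? (fun p => p.1 == k)).map (·.2)

-- 'for item in reversed(L): try: return item[k] except: pass' — early return on first success
def pvScanA (items : List (List (String × Int))) (k : String) : Option Int :=
  match items with
  | [] => none
  | item :: rest =>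
    match pvGetKey? item k with
    | some v => some v
    | none => pvScanA rest k

def lookupVal (L : List (List (String × Int))) (k : String) : Option Int :=
  pvScanA L.reverse k

-- ===== PORT B =====
-- result = None; for item in L: try: result = item[k] except: pass; return result
def lookupVal_alt (L : List (List (String × Int))) (k : String) : Option Int :=
  L.foldl (fun result item =>
    match pvGetKey? item k with
    | some v => some v
    | none => result) none

-- ===== PRECONDITION & SPEC =====
def Spec_lookupVal (L : List (List (String × Int))) (k : String) (out : Option Int) : Prop := out = lookupVal_alt L k
instance (L : List (List (String × Int))) (k : String) (out : Option Int) : Decidable (Spec_lookupVal L k out) := by unfold Spec_lookupVal; infer_instance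

-- ===== CLAIM (what is proved, stated in full; the proofs are below) =====
def Claim_equal_lookupVal : Prop := ∀ (L : List (List (String × Int))) (k : String), Dom_lookupVal L k → Spec_lookupVal L k (lookupVal L k)

-- ===== LEMMAS AND PROOFS =====

-- ===== VERDICT (by name: the statement is the Claim_ definition above) =====
-- A's early-return scan over a reversed prefix equals B's fold over that prefix.
theorem pvScanA_eq_foldl (xs : List (List (String × Int))) (k : String) :
    pvScanA xs.reverse k =
      xs.foldl (fun result item =>
        match pvGetKey? item k with
        | some v => some v
        | none => result) none := by
  induction xs using List.reverseRecOn with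
  | nil => rfl
  | append_singleton ys x ih =>
    simp only [List.reverse_append, List.reverse_cons, List.reverse_nil, List.nil_append,
      List.cons_append, List.foldl_append, List.foldl_cons, List.foldl_nil, pvScanA]
    cases pvGetKey? x k with
    | none => simpa using ih
    | some v => rfl

theorem lookupVal_spec : Claim_equal_lookupVal := by
  intro L k _
  show lookupVal L k = lookupVal_alt L k
  exact pvScanA_eq_foldl L k
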